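-- pv_equiv track=rewrite | github.com/Malk97sc/Computer_Vision_Research | Images_Course/Workshops/Clock_detection/HourDetection.py | _cluster_by_angle
-- ===== SOURCE A (Python) =====
-- def _cluster_by_angle(canditates, interval_deg=10):
--     if not canditates:
--         return []
--
--     cands = sorted(canditates, key=lambda t: t[1])
--
--     clusters = []
--     cur = [cands[0]]
--     last_angle = cands[0][1]
--
--     for length, angle in cands[1:]:
--         if (angle - last_angle) <= interval_deg:
--             cur.append((length, angle))
--         else:
--             clusters.append(cur)
--             cur = [(length, angle)]
--         last_angle = angle
--
--     clusters.append(cur)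
--
--     return clusters #(length, angle)
-- ===== SOURCE B (Python) =====
-- def _cluster_by_angle(canditates, interval_deg=10):
--     if not canditates:
--         return []
--     cands = sorted(canditates, key=lambda t: t[1])
--     cuts = [i for i, (p, q) in enumerate(zip(cands, cands[1:]), 1)
--             if q[1] - p[1] > interval_deg]
--     bounds = [0] + cuts + [len(cands)]
--     return [cands[a:b] for a, b in zip(bounds, bounds[1:])]
-- ===== Notes on version B (the rewrite author's own statement) =====
-- stated objective: alternative
-- what changed: B is staged: after sorting it first materialises the list of cut indices (positions where the angle gap to the previous element exceeds interval_deg), forms the bounds list [0]+cuts+[n], and then produces the clusters by slicing the sorted list between consecutive bounds, instead of A's single accumulator loop with a running cluster and last_angle state.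
import Mathlib
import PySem

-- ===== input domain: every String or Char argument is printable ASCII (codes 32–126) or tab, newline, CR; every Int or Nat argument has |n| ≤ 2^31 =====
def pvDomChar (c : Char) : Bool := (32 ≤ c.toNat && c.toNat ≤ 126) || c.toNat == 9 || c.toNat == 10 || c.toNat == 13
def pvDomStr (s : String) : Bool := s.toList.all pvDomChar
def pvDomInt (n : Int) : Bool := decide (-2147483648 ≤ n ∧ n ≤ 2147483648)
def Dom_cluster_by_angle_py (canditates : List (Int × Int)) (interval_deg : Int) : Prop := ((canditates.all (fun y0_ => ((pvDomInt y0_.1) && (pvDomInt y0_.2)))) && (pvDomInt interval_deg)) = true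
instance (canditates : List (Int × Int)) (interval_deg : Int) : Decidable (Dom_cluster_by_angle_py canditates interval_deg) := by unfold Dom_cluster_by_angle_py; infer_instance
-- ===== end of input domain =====

-- B is a staged re-decomposition: sort, collect the boundary indices (where the gap between
-- neighbours exceeds interval_deg) into a cut-point list, then build the result by slicing the
-- sorted list between consecutive cut points; objective: alternative decomposition.


-- ===== PORT A =====
-- loop body: state = (clusters, cur, last_angle)
def pvAStep (interval_deg : Int)
    (st : List (List (Int × Int)) × List (Int × Int) × Int) (x : Int × Int) :
    List (List (Int × Int)) × List (Int × Int) × Int :=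
  if x.2 - st.2.2 ≤ interval_deg then (st.1, st.2.1 ++ [x], x.2)
  else (st.1 ++ [st.2.1], [x], x.2)

def cluster_by_angle_py (canditates : List (Int × Int)) (interval_deg : Int) : List (List (Int × Int)) :=
  if canditates = [] then []
  else
    match PySem.List.sorted canditates (fun t => t.2) false with
    | [] => []  -- unreachable: sorted of a nonempty list is nonempty
    | c0 :: rest =>
      let s := rest.foldl (pvAStep interval_deg) ([], [c0], c0.2)
      s.1 ++ [s.2.1]

-- ===== PORT B =====
-- enumerate(zs, k): hand port of Python's enumerate with a start index
def pvEnum {α : Type} (k : Int) : List α → List (Int × α)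
  | [] => []
  | a :: as => (k, a) :: pvEnum (k + 1) as

def cluster_by_angle_py_alt (canditates : List (Int × Int)) (interval_deg : Int) : List (List (Int × Int)) :=
  if canditates = [] then []
  else
    let cands := PySem.List.sorted canditates (fun t => t.2) false
    -- cuts = [i for i, (p, q) in enumerate(zip(cands, cands[1:]), 1) if q[1] - p[1] > interval_deg]
    let cuts := ((pvEnum 1 (cands.zip cands.tail)).filter
        (fun ip => decide (interval_deg < ip.2.2.2 - ip.2.1.2))).map (fun ip => ip.1)
    -- bounds = [0] + cuts + [len(cands)]
    let bounds := 0 :: cuts ++ [(cands.length : Int)]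
    -- [cands[a:b] for a, b in zip(bounds, bounds[1:])]
    (bounds.zip bounds.tail).map (fun ab => PySem.List.slice cands (some ab.1) (some ab.2))

-- ===== PRECONDITION & SPEC =====
def Spec_cluster_by_angle_py (canditates : List (Int × Int)) (interval_deg : Int) (out : List (List (Int × Int))) : Prop := out = cluster_by_angle_py_alt canditates interval_deg
instance (canditates : List (Int × Int)) (interval_deg : Int) (out : List (List (Int × Int))) : Decidable (Spec_cluster_by_angle_py canditates interval_deg out) := by unfold Spec_cluster_by_angle_py; infer_instance

-- ===== CLAIM (what is proved, stated in full; the proofs are below) =====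
def Claim_equal_cluster_by_angle_py : Prop := ∀ (canditates : List (Int × Int)) (interval_deg : Int), Dom_cluster_by_angle_py canditates interval_deg → Spec_cluster_by_angle_py canditates interval_deg (cluster_by_angle_py canditates interval_deg)

-- ===== LEMMAS AND PROOFS =====

-- proof-only common specification: right-fold grouping (attach each item to the head cluster
-- when its gap to that cluster's first element is small, else open a new cluster)
def pvBStep (interval_deg : Int) (x : Int × Int) (clusters : List (List (Int × Int))) :
    List (List (Int × Int)) :=
  match clusters with
  | (y :: c) :: cs => if y.2 - x.2 ≤ interval_deg then (x :: y :: c) :: cs else [x] :: (y :: c) :: cs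
  | _ => [x] :: clusters

-- proof-only: how an open cluster `cur` (whose last angle is `last`) absorbs, or not,
-- the head cluster of an already-built grouping
def pvMerge (interval_deg last : Int) (cur : List (Int × Int)) (gs : List (List (Int × Int))) :
    List (List (Int × Int)) :=
  match gs with
  | (y :: c) :: cs => if y.2 - last ≤ interval_deg then (cur ++ y :: c) :: cs else cur :: (y :: c) :: cs
  | _ => cur :: gs

-- proof-only names for the stages of B
def pvCuts (iv : Int) (l : List (Int × Int)) : List Int :=
  ((pvEnum 1 (l.zip l.tail)).filter (fun ip => decide (iv < ip.2.2.2 - ip.2.1.2))).map (fun ip => ip.1)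

def pvSlices (l : List (Int × Int)) (ws : List Int) : List (List (Int × Int)) :=
  (ws.zip ws.tail).map (fun ab => PySem.List.slice l (some ab.1) (some ab.2))

lemma pvAlt_unfold (c : List (Int × Int)) (iv : Int) (h : ¬ c = []) :
    cluster_by_angle_py_alt c iv =
      pvSlices (PySem.List.sorted c (fun t => t.2) false)
        (0 :: (pvCuts iv (PySem.List.sorted c (fun t => t.2) false)
            ++ [((PySem.List.sorted c (fun t => t.2) false).length : Int)])) := by
  simp [cluster_by_angle_py_alt, pvSlices, pvCuts, h]

-- ---- A-side: the fold with (clusters, cur, last) state equals the right-fold spec ----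

lemma pvLoop_eq (iv : Int) :
    ∀ (rest : List (Int × Int)) (cls : List (List (Int × Int))) (cur : List (Int × Int)) (last : Int),
      (rest.foldl (pvAStep iv) (cls, cur, last)).1 ++ [(rest.foldl (pvAStep iv) (cls, cur, last)).2.1]
        = cls ++ pvMerge iv last cur (rest.foldr (pvBStep iv) []) := by
  intro rest
  induction rest with
  | nil => intro cls cur last; simp [pvMerge]
  | cons r rs ih =>
    intro cls cur last
    simp only [List.foldl_cons, List.foldr_cons, pvAStep]
    by_cases h : r.2 - last ≤ iv
    · simp only [if_pos h]
      rw [ih]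
      rcases hgs : rs.foldr (pvBStep iv) [] with _ | ⟨g, cs⟩
      · simp [pvMerge, pvBStep, h]
      · rcases g with _ | ⟨y, c⟩
        · simp [pvMerge, pvBStep, h]
        · by_cases h2 : y.2 - r.2 ≤ iv
          · simp [pvMerge, pvBStep, h, h2]
          · simp [pvMerge, pvBStep, h, h2]
    · simp only [if_neg h]
      rw [ih]
      rcases hgs : rs.foldr (pvBStep iv) [] with _ | ⟨g, cs⟩
      · simp [pvMerge, pvBStep, h]
      · rcases g with _ | ⟨y, c⟩
        · simp [pvMerge, pvBStep, h]
        · by_cases h2 : y.2 - r.2 ≤ iv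
          · simp [pvMerge, pvBStep, h, h2]
          · simp [pvMerge, pvBStep, h, h2]

lemma pvMerge_single (iv : Int) (x : Int × Int) (gs : List (List (Int × Int))) :
    pvMerge iv x.2 [x] gs = pvBStep iv x gs := by
  rcases gs with _ | ⟨g, cs⟩
  · simp [pvMerge, pvBStep]
  · rcases g with _ | ⟨y, c⟩
    · simp [pvMerge, pvBStep]
    · by_cases h2 : y.2 - x.2 ≤ iv <;> simp [pvMerge, pvBStep, h2]

-- ---- B-side: cut-point slicing equals the right-fold spec ----

lemma pvEnum_shift {α : Type} : ∀ (xs : List α) (k : Int),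
    pvEnum (k + 1) xs = (pvEnum k xs).map (fun p => (p.1 + 1, p.2)) := by
  intro xs
  induction xs with
  | nil => intro k; simp [pvEnum]
  | cons a as ih => intro k; simp [pvEnum, ih (k + 1)]

lemma pvEnum_ge {α : Type} : ∀ (xs : List α) (k : Int) (p : Int × α),
    p ∈ pvEnum k xs → k ≤ p.1 := by
  intro xs
  induction xs with
  | nil => intro k p hp; simp [pvEnum] at hp
  | cons a as ih =>
    intro k p hp
    simp only [pvEnum, List.mem_cons] at hp
    rcases hp with rfl | hp
    · simp
    · have := ih (k + 1) p hp; omega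

lemma pvCuts_pos (iv : Int) (l : List (Int × Int)) : ∀ c ∈ pvCuts iv l, 1 ≤ c := by
  intro c hc
  simp only [pvCuts, List.mem_map, List.mem_filter] at hc
  obtain ⟨p, ⟨hp, _⟩, rfl⟩ := hc
  exact pvEnum_ge _ 1 p hp

lemma pvCuts_cons (iv : Int) (x y : Int × Int) (ys : List (Int × Int)) :
    pvCuts iv (x :: y :: ys)
      = (if iv < y.2 - x.2 then [(1 : Int)] else []) ++ (pvCuts iv (y :: ys)).map (· + 1) := by
  simp only [pvCuts, List.zip_cons_cons, List.tail_cons, pvEnum, pvEnum_shift _ 1,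
    List.filter_cons, List.filter_map, List.map_map]
  by_cases h : iv < y.2 - x.2 <;> simp [h, Function.comp_def]

lemma pvSlices_cons (l : List (Int × Int)) (w1 w2 : Int) (ws : List Int) :
    pvSlices l (w1 :: w2 :: ws)
      = PySem.List.slice l (some w1) (some w2) :: pvSlices l (w2 :: ws) := by
  simp [pvSlices]

lemma pvSlice_cons_shift (x : Int × Int) (xs : List (Int × Int)) (c d : Int)
    (hc : 0 ≤ c) (hd : 0 ≤ d) :
    PySem.List.slice (x :: xs) (some (c + 1)) (some (d + 1))
      = PySem.List.slice xs (some c) (some d) := by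
  rw [PySem.List.slice_toNat (x :: xs) (by omega) (by omega),
      PySem.List.slice_toNat xs hc hd]
  have h1 : (c + 1).toNat = c.toNat + 1 := by omega
  have h2 : (d + 1).toNat = d.toNat + 1 := by omega
  simp [h1, h2]

lemma pvSlice_cons_zero (x : Int × Int) (xs : List (Int × Int)) (d : Int) (hd : 0 ≤ d) :
    PySem.List.slice (x :: xs) (some 0) (some (d + 1))
      = x :: PySem.List.slice xs (some 0) (some d) := by
  rw [PySem.List.slice_toNat (x :: xs) (by omega) (by omega),
      PySem.List.slice_toNat xs (by omega) hd]
  have h2 : (d + 1).toNat = d.toNat + 1 := by omega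
  simp [h2, List.take_succ_cons]

lemma pvSlices_shift (x : Int × Int) (xs : List (Int × Int)) :
    ∀ (ws : List Int), (∀ w ∈ ws, 0 ≤ w) →
      pvSlices (x :: xs) (ws.map (· + 1)) = pvSlices xs ws := by
  intro ws
  induction ws with
  | nil => intro _; simp [pvSlices]
  | cons w1 rest ih =>
    intro hn
    rcases rest with _ | ⟨w2, ws'⟩
    · simp [pvSlices]
    · simp only [List.map_cons] at *
      rw [pvSlices_cons, pvSlices_cons,
        pvSlice_cons_shift x xs w1 w2 (hn w1 (by simp)) (hn w2 (by simp)),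
        ih (fun w hw => hn w (List.mem_cons_of_mem _ hw))]

lemma pvFoldr_head (iv : Int) (y : Int × Int) (ys : List (Int × Int)) :
    ∃ c cs, (y :: ys).foldr (pvBStep iv) [] = (y :: c) :: cs := by
  simp only [List.foldr_cons]
  rcases ys.foldr (pvBStep iv) [] with _ | ⟨g, cs⟩
  · exact ⟨[], [], by simp [pvBStep]⟩
  · rcases g with _ | ⟨z, c⟩
    · exact ⟨[], [] :: cs, by simp [pvBStep]⟩
    · by_cases h : z.2 - y.2 ≤ iv
      · exact ⟨z :: c, cs, by simp [pvBStep, h]⟩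
      · exact ⟨[], (z :: c) :: cs, by simp [pvBStep, h]⟩

lemma pvCore_eq (iv : Int) :
    ∀ (xs : List (Int × Int)) (x : Int × Int),
      pvSlices (x :: xs) (0 :: (pvCuts iv (x :: xs) ++ [((x :: xs).length : Int)]))
        = (x :: xs).foldr (pvBStep iv) [] := by
  intro xs
  induction xs with
  | nil =>
    intro x
    have h1 : PySem.List.slice [x] (some 0) (some 1) = [x] := by
      rw [PySem.List.slice_toNat [x] (by omega) (by omega)]; simp
    simp [pvCuts, pvEnum, pvSlices, pvBStep, h1]
  | cons y ys ih =>
    intro x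
    obtain ⟨c, cs, hfold⟩ := pvFoldr_head iv y ys
    have hnn : ∀ w ∈ pvCuts iv (y :: ys) ++ [((y :: ys).length : Int)], 0 ≤ w := by
      intro w hw
      rcases List.mem_append.mp hw with hw | hw
      · have := pvCuts_pos iv (y :: ys) w hw; omega
      · simp at hw; omega
    rw [pvCuts_cons]
    by_cases h : iv < y.2 - x.2
    · -- gap at the front: a new cluster [x] is cut off
      have hb : (0 : Int) :: ((if iv < y.2 - x.2 then [(1:Int)] else []) ++ (pvCuts iv (y :: ys)).map (· + 1)
              ++ [((x :: y :: ys).length : Int)])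
          = 0 :: 1 :: ((0 :: (pvCuts iv (y :: ys) ++ [((y :: ys).length : Int)])).map (· + 1)).tail := by
        simp [h]
      rw [hb, pvSlices_cons]
      have h1 : PySem.List.slice (x :: y :: ys) (some 0) (some 1) = [x] := by
        rw [PySem.List.slice_toNat (x :: y :: ys) (by omega) (by omega)]; simp
      have hmap : (1 : Int) :: ((0 :: (pvCuts iv (y :: ys) ++ [((y :: ys).length : Int)])).map (· + 1)).tail
          = (0 :: (pvCuts iv (y :: ys) ++ [((y :: ys).length : Int)])).map (· + 1) := by simp
      have hnn0 : ∀ w ∈ (0 : Int) :: (pvCuts iv (y :: ys) ++ [((y :: ys).length : Int)]), 0 ≤ w := by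
        intro w hw
        rcases List.mem_cons.mp hw with rfl | hw
        · omega
        · exact hnn w hw
      have hfold' : pvBStep iv y (ys.foldr (pvBStep iv) []) = (y :: c) :: cs := by
        simpa using hfold
      rw [h1, hmap, pvSlices_shift x (y :: ys) _ hnn0, ih y]
      simp only [List.foldr_cons, hfold']
      simp [pvBStep]
      omega
    · -- no gap: x is absorbed into the head cluster
      have hb : (0 : Int) :: ((if iv < y.2 - x.2 then [(1:Int)] else []) ++ (pvCuts iv (y :: ys)).map (· + 1)
              ++ [((x :: y :: ys).length : Int)])
          = 0 :: ((pvCuts iv (y :: ys) ++ [((y :: ys).length : Int)]).map (· + 1)) := by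
        simp [h]
      rw [hb]
      rcases hC : pvCuts iv (y :: ys) ++ [((y :: ys).length : Int)] with _ | ⟨d, rest⟩
      · simp at hC
      · have hd : 0 ≤ d := hnn d (by rw [hC]; simp)
        rw [List.map_cons, pvSlices_cons]
        have hzero : PySem.List.slice (x :: y :: ys) (some 0) (some (d + 1))
            = x :: PySem.List.slice (y :: ys) (some 0) (some d) := pvSlice_cons_zero _ _ d hd
        have ihy := ih y
        rw [hC, pvSlices_cons, hfold] at ihy
        have hrest_nn : ∀ w ∈ (d :: rest), 0 ≤ w := by rw [← hC]; exact hnn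
        have hshift : pvSlices (x :: y :: ys) ((d + 1) :: rest.map (· + 1))
            = pvSlices (y :: ys) (d :: rest) := by
          have := pvSlices_shift x (y :: ys) (d :: rest) hrest_nn
          simpa using this
        rw [hzero, hshift]
        have hs1 : PySem.List.slice (y :: ys) (some 0) (some d) = y :: c :=
          (List.cons_eq_cons.mp ihy).1
        have hs2 : pvSlices (y :: ys) (d :: rest) = cs :=
          (List.cons_eq_cons.mp ihy).2
        rw [hs1, hs2, List.foldr_cons, hfold]
        simp [pvBStep]
        omega

-- ===== VERDICT (by name: the statement is the Claim_ definition above) =====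
theorem cluster_by_angle_py_spec : Claim_equal_cluster_by_angle_py := by
  intro canditates iv _
  unfold Spec_cluster_by_angle_py
  by_cases hc : canditates = []
  · subst hc; simp [cluster_by_angle_py, cluster_by_angle_py_alt]
  · rw [pvAlt_unfold canditates iv hc]
    unfold cluster_by_angle_py
    simp only [if_neg hc]
    rcases hs : PySem.List.sorted canditates (fun t => t.2) false with _ | ⟨c0, rest⟩
    · exact absurd (List.Perm.nil_eq (hs ▸ (PySem.List.sorted_perm canditates (fun t => t.2) false))).symm hc
    · simp only []
      rw [pvLoop_eq iv rest [] [c0] c0.2, pvMerge_single, pvCore_eq iv rest c0]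
      simp
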